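-- pv_equiv track=rewrite | github.com/OTOYO1020/ChatDev_Intermediate | WareHouse/ED_190__20250518071049/gem_sequence.py | can_form_sequence
-- ===== SOURCE A (Python) =====
-- from collections import defaultdict, deque
-- from typing import List, Tuple
--
-- def can_form_sequence(N: int, M: int, pairs: List[Tuple[int, int]], required_gems: List[int]) -> Tuple[bool, int]:
--     # Handle edge case where there are no gems
--     if N == 0:
--         return (len(required_gems) == 0, 0)  # No gems, check if no required gems
--     if M == 0:
--         # If there are required gems and no pairs, return False
--         if required_gems:
--             return (False, 0)  # Cannot form a valid sequence without pairs
--         return (True, 0)  # Return True if no required gems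
--     # Check for invalid required gems
--     if any(gem < 1 or gem > N for gem in required_gems):
--         return (False, 0)  # Invalid required gems
--     # Handle edge case where there is only one required gem
--     if len(required_gems) == 1 and required_gems[0] > N:
--         return (False, 0)  # Required gem is not present in the range of gems
--     graph = defaultdict(list)
--     for a, b in pairs:
--         graph[a].append(b)
--         graph[b].append(a)
--     visited = set()
--     components = []
--     def bfs(start):
--         """
--         Perform BFS to find all gems in the connected component starting from 'start'.
--         Parameters:
--         start (int): The starting gem for the BFS traversal.
--         Returns:
--         set: A set of gems in the connected component.
--         """
--         queue = deque([start])
--         component = set()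
--         while queue:
--             node = queue.popleft()
--             if node not in visited:
--                 visited.add(node)
--                 component.add(node)
--                 for neighbor in graph[node]:
--                     if neighbor not in visited:
--                         queue.append(neighbor)
--         return component
--     for gem in range(1, N + 1):
--         if gem not in visited:
--             component = bfs(gem)
--             components.append(component)
--     # Create a set of required gems for easy checking, filtering out invalid gems
--     required_set = {gem for gem in required_gems if 1 <= gem <= N}
--     # Check if the number of unique required gems is greater than the total number of gems
--     if len(required_set) > N:
--         return (False, 0)  # More required gems than available gems
--     found_required_gems = set()
--     for component in components:
--         found_required_gems.update(component.intersection(required_set))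
--     # Check if all required gems are found in the components
--     if all(gem in found_required_gems for gem in required_set):
--         min_gems = len(required_set.intersection(found_required_gems))  # Count only the unique required gems found
--         return (True, min_gems)
--     # Handle case where required_gems is empty
--     if not required_set:
--         return (True, 0)  # No gems needed
--     return (False, 0)
-- ===== SOURCE B (Python) =====
-- def can_form_sequence(N, M, pairs, required_gems):
--     # Direct arithmetic answer: the graph/BFS in the original never affects the result.
--     if N == 0:
--         return (len(required_gems) == 0, 0)
--     if M == 0:
--         return (not required_gems, 0)
--     if N < 0:
--         return (False, 0)
--     if all(1 <= g <= N for g in required_gems):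
--         return (True, len(set(required_gems)))
--     return (False, 0)
-- ===== Notes on version B (the rewrite author's own statement) =====
-- stated objective: simpler
-- what changed: A builds an adjacency graph and runs BFS over all gems 1..N to collect connected components, but the components never affect the answer; B drops the graph/BFS entirely and returns the closed-form answer: validity of the required gems plus the count of distinct required gems.
import Mathlib
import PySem

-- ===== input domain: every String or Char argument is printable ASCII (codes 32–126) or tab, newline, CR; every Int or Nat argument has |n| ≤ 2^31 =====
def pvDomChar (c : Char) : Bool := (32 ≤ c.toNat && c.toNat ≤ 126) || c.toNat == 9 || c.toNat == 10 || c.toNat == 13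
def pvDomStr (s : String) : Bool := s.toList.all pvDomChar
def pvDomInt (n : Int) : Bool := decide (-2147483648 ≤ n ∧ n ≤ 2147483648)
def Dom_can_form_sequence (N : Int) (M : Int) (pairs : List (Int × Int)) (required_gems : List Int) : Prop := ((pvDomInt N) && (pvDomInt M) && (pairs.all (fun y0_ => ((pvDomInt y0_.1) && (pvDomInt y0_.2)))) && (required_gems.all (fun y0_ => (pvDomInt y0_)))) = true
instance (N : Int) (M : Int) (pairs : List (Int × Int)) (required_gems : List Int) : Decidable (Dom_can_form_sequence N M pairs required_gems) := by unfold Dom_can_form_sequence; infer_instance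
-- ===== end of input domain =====

-- B replaces A's graph construction + BFS decomposition (whose components never affect the answer)
-- by the direct closed-form answer: simpler; equivalence proved for all inputs (A is total here).

-- ===== PORT A =====
-- Python's `while queue` BFS, with a fuel parameter that only makes the recursion total:
-- each loop iteration pops one element; at most 1 + 2*len(pairs) elements are ever enqueued
-- in one call (the start, plus adjacency entries of newly visited nodes), so the fuel
-- `2 * pairs.length + 1` used below is never exhausted. Returns (component, visited).
def pvBFS (graph : PySem.Dict Int (List Int)) :
    Nat → List Int → PySem.Set Int → PySem.Set Int → PySem.Set Int × PySem.Set Int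
  | 0, _, visited, component => (component, visited)
  | fuel + 1, queue, visited, component =>
    match queue with
    | [] => (component, visited)
    | node :: rest =>
      if PySem.Set.contains visited node then
        pvBFS graph fuel rest visited component
      else
        let visited' := PySem.Set.add visited node
        let component' := PySem.Set.add component node
        let nbrs := (graph.getD node []).filter (fun nb => !(PySem.Set.contains visited' nb))
        pvBFS graph fuel (rest ++ nbrs) visited' component'

-- one iteration of A's `for gem in range(1, N + 1)` loop (state = (visited, components))
def pvStep (graph : PySem.Dict Int (List Int)) (fuel : Nat)
    (st : PySem.Set Int × List (PySem.Set Int)) (gem : Int) :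
    PySem.Set Int × List (PySem.Set Int) :=
  if PySem.Set.contains st.1 gem then st
  else
    let r := pvBFS graph fuel [gem] st.1 PySem.Set.empty
    (r.2, st.2 ++ [r.1])

def can_form_sequence (N : Int) (M : Int) (pairs : List (Int × Int)) (required_gems : List Int) : Bool × Int :=
  if N = 0 then (decide (required_gems.length = 0), 0)
  else if M = 0 then
    if !required_gems.isEmpty then (false, 0) else (true, 0)
  else if required_gems.any (fun gem => gem < 1 || gem > N) then (false, 0)
  else if (match required_gems with | [g] => decide (g > N) | _ => false) then (false, 0)
  else
    -- graph[a].append(b); graph[b].append(a)  (defaultdict(list))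
    let graph := pairs.foldl
      (fun g p => (g.modify p.1 [] (· ++ [p.2])).modify p.2 [] (· ++ [p.1]))
      PySem.Dict.empty
    let st := (PySem.List.pyRange 1 (N + 1)).foldl (pvStep graph (2 * pairs.length + 1))
      (PySem.Set.empty, [])
    let components := st.2
    let required_set := PySem.Set.ofList (required_gems.filter (fun gem => 1 ≤ gem && gem ≤ N))
    if ((required_set.length : Int) > N) then (false, 0)
    else
      let found := components.foldl
        (fun f c => PySem.Set.update f (PySem.Set.inter c required_set)) PySem.Set.empty
      if required_set.all (fun gem => PySem.Set.contains found gem) then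
        (true, ((PySem.Set.inter required_set found).length : Int))
      else if required_set.isEmpty then (true, 0)
      else (false, 0)

-- ===== PORT B =====
def can_form_sequence_alt (N : Int) (M : Int) (pairs : List (Int × Int)) (required_gems : List Int) : Bool × Int :=
  if N = 0 then (decide (required_gems.length = 0), 0)
  else if M = 0 then (required_gems.isEmpty, 0)
  else if N < 0 then (false, 0)
  else if required_gems.all (fun g => 1 ≤ g && g ≤ N) then
    (true, ((PySem.Set.ofList required_gems).length : Int))
  else (false, 0)

-- ===== PRECONDITION & SPEC =====
def Spec_can_form_sequence (N : Int) (M : Int) (pairs : List (Int × Int)) (required_gems : List Int) (out : Bool × Int) : Prop := out = can_form_sequence_alt N M pairs required_gems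
instance (N : Int) (M : Int) (pairs : List (Int × Int)) (required_gems : List Int) (out : Bool × Int) : Decidable (Spec_can_form_sequence N M pairs required_gems out) := by unfold Spec_can_form_sequence; infer_instance

-- ===== CLAIM (what is proved, stated in full; the proofs are below) =====
def Claim_equal_can_form_sequence : Prop := ∀ (N : Int) (M : Int) (pairs : List (Int × Int)) (required_gems : List Int), Dom_can_form_sequence N M pairs required_gems → Spec_can_form_sequence N M pairs required_gems (can_form_sequence N M pairs required_gems)

-- ===== LEMMAS AND PROOFS =====

-- visited only grows through a BFS call
theorem pvBFS_visited_mono (graph : PySem.Dict Int (List Int)) :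
    ∀ (fuel : Nat) (q : List Int) (v c : PySem.Set Int) (x : Int),
      x ∈ v → x ∈ (pvBFS graph fuel q v c).2 := by
  intro fuel
  induction fuel with
  | zero => intro q v c x hx; simpa [pvBFS] using hx
  | succ n ih =>
    intro q v c x hx
    cases q with
    | nil => simpa [pvBFS] using hx
    | cons node rest =>
      simp only [pvBFS]
      split
      · exact ih _ _ _ _ hx
      · exact ih _ _ _ _ ((PySem.Set.mem_add _ _ _).mpr (Or.inl hx))

-- the component only grows through a BFS call
theorem pvBFS_comp_mono (graph : PySem.Dict Int (List Int)) :
    ∀ (fuel : Nat) (q : List Int) (v c : PySem.Set Int) (x : Int),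
      x ∈ c → x ∈ (pvBFS graph fuel q v c).1 := by
  intro fuel
  induction fuel with
  | zero => intro q v c x hx; simpa [pvBFS] using hx
  | succ n ih =>
    intro q v c x hx
    cases q with
    | nil => simpa [pvBFS] using hx
    | cons node rest =>
      simp only [pvBFS]
      split
      · exact ih _ _ _ _ hx
      · exact ih _ _ _ _ ((PySem.Set.mem_add _ _ _).mpr (Or.inl hx))

-- every element of the final visited was already visited or is in the returned component
theorem pvBFS_visited_sub (graph : PySem.Dict Int (List Int)) :
    ∀ (fuel : Nat) (q : List Int) (v c : PySem.Set Int) (x : Int),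
      x ∈ (pvBFS graph fuel q v c).2 → x ∈ v ∨ x ∈ (pvBFS graph fuel q v c).1 := by
  intro fuel
  induction fuel with
  | zero => intro q v c x hx; left; simpa [pvBFS] using hx
  | succ n ih =>
    intro q v c x hx
    cases q with
    | nil => left; simpa [pvBFS] using hx
    | cons node rest =>
      simp only [pvBFS] at hx ⊢
      by_cases h : PySem.Set.contains v node = true
      · simp only [h, if_pos] at hx ⊢
        exact ih _ _ _ _ hx
      · simp only [h, if_neg, Bool.false_eq_true, not_false_iff] at hx ⊢
        rcases ih _ _ _ _ hx with hv | hc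
        · rcases (PySem.Set.mem_add _ _ _).mp hv with hv' | rfl
          · exact Or.inl hv'
          · right
            exact pvBFS_comp_mono graph n _ _ _ _ ((PySem.Set.mem_add _ _ _).mpr (Or.inr rfl))
        · exact Or.inr hc

-- a started BFS visits its start
theorem pvBFS_start (graph : PySem.Dict Int (List Int)) (n : Nat) (v c : PySem.Set Int)
    (start : Int) : start ∈ (pvBFS graph (n + 1) [start] v c).2 := by
  simp only [pvBFS]
  by_cases h : PySem.Set.contains v start = true
  · simp only [h, if_pos]
    exact pvBFS_visited_mono graph n _ _ _ _ ((PySem.Set.contains_iff _ _).mp h)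
  · simp only [h, Bool.false_eq_true, if_neg, not_false_iff]
    exact pvBFS_visited_mono graph n _ _ _ _ ((PySem.Set.mem_add _ _ _).mpr (Or.inr rfl))

-- visited grows through the outer loop
theorem loop_mono (graph : PySem.Dict Int (List Int)) (fuel : Nat) :
    ∀ (l : List Int) (st : PySem.Set Int × List (PySem.Set Int)) (x : Int),
      x ∈ st.1 → x ∈ (l.foldl (pvStep graph fuel) st).1 := by
  intro l
  induction l with
  | nil => intro st x hx; simpa using hx
  | cons g rest ih =>
    intro st x hx
    simp only [List.foldl_cons]
    apply ih
    unfold pvStep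
    split
    · exact hx
    · exact pvBFS_visited_mono graph fuel _ _ _ _ hx

-- every gem the outer loop ranges over ends up visited (fuel ≥ 1)
theorem loop_covers (graph : PySem.Dict Int (List Int)) (n : Nat) :
    ∀ (l : List Int) (st : PySem.Set Int × List (PySem.Set Int)) (g : Int),
      g ∈ l → g ∈ (l.foldl (pvStep graph (n + 1)) st).1 := by
  intro l
  induction l with
  | nil => intro st g hg; cases hg
  | cons a rest ih =>
    intro st g hg
    simp only [List.foldl_cons]
    rcases List.mem_cons.mp hg with rfl | hg'
    · apply loop_mono
      unfold pvStep
      by_cases h : PySem.Set.contains st.1 g = true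
      · simp only [h, if_pos]
        exact (PySem.Set.contains_iff _ _).mp h
      · simp only [h, Bool.false_eq_true, if_neg, not_false_iff]
        exact pvBFS_start graph n st.1 PySem.Set.empty g
    · exact ih _ _ hg'

-- everything visited lies in some collected component
theorem loop_in_components (graph : PySem.Dict Int (List Int)) (fuel : Nat) :
    ∀ (l : List Int) (st : PySem.Set Int × List (PySem.Set Int)),
      (∀ x ∈ st.1, ∃ c ∈ st.2, x ∈ c) →
      ∀ x ∈ (l.foldl (pvStep graph fuel) st).1, ∃ c ∈ (l.foldl (pvStep graph fuel) st).2, x ∈ c := by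
  intro l
  induction l with
  | nil => intro st h x hx; exact h x hx
  | cons a rest ih =>
    intro st h
    simp only [List.foldl_cons]
    apply ih
    unfold pvStep
    split
    · exact h
    · intro x hx
      rcases pvBFS_visited_sub graph fuel [a] st.1 PySem.Set.empty x hx with hv | hc
      · rcases h x hv with ⟨c, hc1, hc2⟩
        exact ⟨c, by simp [hc1], hc2⟩
      · exact ⟨_, by simp, hc⟩

-- membership in A's found_required_gems accumulator
theorem found_mem (R : PySem.Set Int) :
    ∀ (comps : List (PySem.Set Int)) (f : PySem.Set Int) (x : Int),
      ((∃ c ∈ comps, x ∈ c) ∧ x ∈ R) ∨ x ∈ f →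
      x ∈ comps.foldl (fun f c => PySem.Set.update f (PySem.Set.inter c R)) f := by
  intro comps
  induction comps with
  | nil => intro f x hx
           rcases hx with ⟨⟨c, hc, _⟩, _⟩ | hf
           · cases hc
           · simpa using hf
  | cons a rest ih =>
    intro f x hx
    simp only [List.foldl_cons]
    apply ih
    rcases hx with ⟨⟨c, hc, hxc⟩, hR⟩ | hf
    · rcases List.mem_cons.mp hc with rfl | hc'
      · right
        exact (PySem.Set.mem_update _ _ _).mpr (Or.inr ((PySem.Set.mem_inter _ _ _).mpr ⟨hxc, hR⟩))
      · exact Or.inl ⟨⟨c, hc', hxc⟩, hR⟩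
    · right
      exact (PySem.Set.mem_update _ _ _).mpr (Or.inl hf)

-- a Nodup list of integers inside [1, N] has at most N elements
theorem nodup_length_le (l : List Int) (N : Int) (hN : 0 ≤ N) (hnd : l.Nodup)
    (h : ∀ x ∈ l, 1 ≤ x ∧ x ≤ N) : (l.length : Int) ≤ N := by
  have hsub : l.toFinset ⊆ Finset.Icc 1 N := by
    intro x hx
    rcases h x (List.mem_toFinset.mp hx) with ⟨h1, h2⟩
    exact Finset.mem_Icc.mpr ⟨h1, h2⟩
  have hcard := Finset.card_le_card hsub
  rw [List.toFinset_card_of_nodup hnd, Int.card_Icc] at hcard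
  omega

-- ===== VERDICT (by name: the statement is the Claim_ definition above) =====
theorem can_form_sequence_spec : Claim_equal_can_form_sequence := by
  intro N M pairs required_gems _hdom
  unfold Spec_can_form_sequence can_form_sequence can_form_sequence_alt
  by_cases hN0 : N = 0
  · simp [hN0]
  · simp only [hN0, if_neg, not_false_iff]
    by_cases hM0 : M = 0
    · simp only [hM0, if_pos]
      cases required_gems <;> simp
    · simp only [hM0, if_neg, not_false_iff]
      by_cases hany : required_gems.any (fun gem => gem < 1 || gem > N) = true
      · -- some required gem out of range: both sides (false, 0)
        have hall : required_gems.all (fun g => 1 ≤ g && g ≤ N) = false := by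
          rcases List.any_eq_true.mp hany with ⟨g, hg, hgp⟩
          apply List.all_eq_false.mpr
          exact ⟨g, hg, by simp at hgp ⊢; omega⟩
        by_cases hNneg : N < 0
        · simp [hany, hNneg]
        · simp [hany, hNneg, hall]
      · -- all required gems in range
        have hin : ∀ g ∈ required_gems, 1 ≤ g ∧ g ≤ N := by
          intro g hg
          have := List.any_eq_false.mp (Bool.not_eq_true _ ▸ hany) g hg
          simp at this; omega
        have hall : required_gems.all (fun g => 1 ≤ g && g ≤ N) = true :=
          List.all_eq_true.mpr (fun g hg => by have := hin g hg; simp; omega)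
        have hfilter : required_gems.filter (fun gem => 1 ≤ gem && gem ≤ N) = required_gems :=
          List.filter_eq_self.mpr (fun g hg => by have := hin g hg; simp; omega)
        by_cases hNneg : N < 0
        · -- N < 0 forces required_gems = [] and A's `len(required_set) > N` fires
          have hreq : required_gems = [] := by
            cases required_gems with
            | nil => rfl
            | cons a rest => exact absurd (hin a (by simp)) (by omega)
          subst hreq
          have hrange : PySem.List.pyRange 1 (N + 1) = [] :=
            PySem.List.pyRange_one_eq_nil (by omega)
          simp only [hany, Bool.false_eq_true, if_neg, not_false_iff, hrange,
            List.foldl_nil, List.filter_nil]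
          simp [PySem.Set.ofList, hNneg]
        · -- N > 0: A returns (true, |set(required_gems)|)
          have hNpos : 0 < N := by omega
          simp only [hany, Bool.false_eq_true, if_neg, not_false_iff, hNneg, hall, if_pos]
          have hsingle : (match required_gems with
              | [g] => decide (g > N) | _ => false) = false := by
            cases required_gems with
            | nil => rfl
            | cons a rest =>
              cases rest with
              | nil => have := hin a (by simp); simp; omega
              | cons b rest2 => rfl
          simp only [hsingle, Bool.false_eq_true, if_neg, not_false_iff]
          rw [hfilter]
          set R := PySem.Set.ofList required_gems with hR
          have hRnd : R.Nodup := PySem.Set.nodup_ofList _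
          have hRin : ∀ x ∈ R, 1 ≤ x ∧ x ≤ N := by
            intro x hx
            exact hin x ((PySem.Set.mem_ofList _ _).mp hx)
          have hlen : ((R.length : Int) > N) = False := by
            simp only [eq_iff_iff, iff_false, not_lt]
            exact nodup_length_le R N (by omega) hRnd hRin
          simp only [hlen, if_false]
          set graph := pairs.foldl
            (fun g p => (g.modify p.1 [] (· ++ [p.2])).modify p.2 [] (· ++ [p.1]))
            PySem.Dict.empty with hgraph
          set st := (PySem.List.pyRange 1 (N + 1)).foldl (pvStep graph (2 * pairs.length + 1))
            (PySem.Set.empty, ([] : List (PySem.Set Int))) with hst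
          set found := st.2.foldl
            (fun f c => PySem.Set.update f (PySem.Set.inter c R)) PySem.Set.empty with hfound
          -- every required gem is found
          have hRfound : ∀ x ∈ R, x ∈ found := by
            intro x hx
            rcases hRin x hx with ⟨h1, h2⟩
            have hmem : x ∈ PySem.List.pyRange 1 (N + 1) :=
              PySem.List.mem_pyRange_one.mpr ⟨h1, by omega⟩
            have hvis : x ∈ st.1 := loop_covers graph (2 * pairs.length) _ _ x hmem
            have hcomp : ∃ c ∈ st.2, x ∈ c :=
              loop_in_components graph _ _ _ (by intro y hy; cases hy) x hvis
            exact found_mem R st.2 PySem.Set.empty x (Or.inl ⟨hcomp, hx⟩)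
          have hallfound : (R.all (fun gem => PySem.Set.contains found gem)) = true :=
            List.all_eq_true.mpr (fun g hg =>
              (PySem.Set.contains_iff _ _).mpr (hRfound g hg))
          simp only [hallfound, if_pos]
          have hinter : PySem.Set.inter R found = R := by
            unfold PySem.Set.inter
            exact List.filter_eq_self.mpr (fun g hg =>
              (PySem.Set.contains_iff _ _).mpr (hRfound g hg))
          rw [hinter]
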